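-- pv_equiv track=rewrite | github.com/camisackmann/Problemas-Algoritmos | clase 12/problema-1.py | count_double_profiles
-- ===== SOURCE A (Python) =====
-- def count_double_profiles(n, m, friendships):
--     friendships_mapped_by_friend = {}
--
--     for a, b in friendships:
--         friendships_mapped_by_friend.setdefault(a, []).append(b)
--         friendships_mapped_by_friend.setdefault(b, []).append(a)
--
--
--     friendship_sets_count = {}
--
--     for friends_list in friendships_mapped_by_friend.values():
--         friend_set = frozenset(friends_list)
--         friendship_sets_count[friend_set] = friendship_sets_count.get(friend_set, 0) + 1
--
--     double_profiles = 0
--     for count in friendship_sets_count.values():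
--         if count > 1:
--             double_profiles += count - 1
--
--     return double_profiles
-- ===== SOURCE B (Python) =====
-- def count_double_profiles(n, m, friendships):
--     adj = {}
--     for a, b in friendships:
--         adj.setdefault(a, []).append(b)
--         adj.setdefault(b, []).append(a)
--     keys = sorted(tuple(sorted(set(v))) for v in adj.values())
--     dup = 0
--     for i in range(1, len(keys)):
--         if keys[i] == keys[i - 1]:
--             dup += 1
--     return dup
-- ===== Notes on version B (the rewrite author's own statement) =====
-- stated objective: alternative
-- what changed: B keeps the adjacency-building loop but replaces A's frozenset tally dict and conditional sum of (count-1) over groups by sort-then-scan: it sorts the canonical friend-sets and counts adjacent equal pairs, which equals the number of duplicate profiles since in sorted order each duplicate group of size k contributes exactly k-1 adjacent equal pairs.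
import Mathlib
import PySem

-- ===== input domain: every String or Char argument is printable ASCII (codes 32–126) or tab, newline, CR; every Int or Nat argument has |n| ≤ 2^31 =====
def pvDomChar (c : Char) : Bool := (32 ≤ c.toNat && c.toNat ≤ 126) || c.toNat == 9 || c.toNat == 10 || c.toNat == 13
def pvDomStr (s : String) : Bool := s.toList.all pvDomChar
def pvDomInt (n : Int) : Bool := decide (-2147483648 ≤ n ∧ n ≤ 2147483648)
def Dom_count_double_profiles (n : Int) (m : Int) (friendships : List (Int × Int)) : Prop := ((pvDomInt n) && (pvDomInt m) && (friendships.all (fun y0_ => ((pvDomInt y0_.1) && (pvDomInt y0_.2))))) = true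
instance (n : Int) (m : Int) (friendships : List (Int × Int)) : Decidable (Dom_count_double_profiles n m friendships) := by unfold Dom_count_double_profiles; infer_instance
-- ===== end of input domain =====

-- B replaces A's hash tally (frozenset-count dict + conditional (count-1)-sum) by
-- sort-then-scan: sort the canonical friend-sets and count adjacent equal pairs.

-- Python's frozenset(l) of ints is modelled by its canonical form: the strictly increasing
-- list of l's distinct elements. Exact, since frozenset equality is extensional equality of
-- the element sets, which for Int lists coincides with equality of these canonical lists.
def pvCanon (l : List Int) : List Int := PySem.List.sorted (PySem.Set.ofList l) (fun x => x) false

-- ===== PORT A =====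
def count_double_profiles (n : Int) (m : Int) (friendships : List (Int × Int)) : Int :=
  -- d.setdefault(k, []).append(x) is exactly d.modify k [] (· ++ [x])
  let adj : PySem.Dict Int (List Int) :=
    friendships.foldl (fun d p => (d.modify p.1 [] (· ++ [p.2])).modify p.2 [] (· ++ [p.1]))
      PySem.Dict.empty
  let counts : PySem.Dict (List Int) Int :=
    adj.values.foldl (fun c l => c.modify (pvCanon l) 0 (· + 1)) PySem.Dict.empty
  counts.values.foldl (fun acc c => if c > 1 then acc + (c - 1) else acc) 0

-- ===== PORT B =====
-- B's scan over range(1, len(keys)) comparing keys[i] with keys[i-1] is this structural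
-- recursion over adjacent pairs of the sorted list (same comparisons, same order).
def pvAdjDups : List (List Int) → Int
  | [] => 0
  | [_] => 0
  | x :: y :: rest => (if x = y then 1 else 0) + pvAdjDups (y :: rest)

def count_double_profiles_alt (n : Int) (m : Int) (friendships : List (Int × Int)) : Int :=
  let adj : PySem.Dict Int (List Int) :=
    friendships.foldl (fun d p => (d.modify p.1 [] (· ++ [p.2])).modify p.2 [] (· ++ [p.1]))
      PySem.Dict.empty
  let keys : List (List Int) := PySem.List.sorted (adj.values.map pvCanon) (fun x => x) false
  pvAdjDups keys

-- ===== PRECONDITION & SPEC =====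
def Spec_count_double_profiles (n : Int) (m : Int) (friendships : List (Int × Int)) (out : Int) : Prop := out = count_double_profiles_alt n m friendships
instance (n : Int) (m : Int) (friendships : List (Int × Int)) (out : Int) : Decidable (Spec_count_double_profiles n m friendships out) := by unfold Spec_count_double_profiles; infer_instance

-- ===== CLAIM (what is proved, stated in full; the proofs are below) =====
def Claim_equal_count_double_profiles : Prop := ∀ (n : Int) (m : Int) (friendships : List (Int × Int)), Dom_count_double_profiles n m friendships → Spec_count_double_profiles n m friendships (count_double_profiles n m friendships)

-- ===== LEMMAS AND PROOFS =====

-- List.count is the same under any lawful BEq instance as under the DecidableEq-derived one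
lemma pv_count_irrel {α : Type} [BEq α] [LawfulBEq α] [DecidableEq α] (k : α) (ks : List α) :
    ks.count k = @List.count α instBEqOfDecidableEq k ks := by
  induction ks with
  | nil => rfl
  | cons x xs ih => simp [List.count_cons, ih]

-- sum of multiplicities over the distinct elements = length of the list
lemma pv_sum_count_ofList {α : Type} [BEq α] [LawfulBEq α] [DecidableEq α] (ks : List α) :
    ((PySem.Set.ofList ks).map (fun k => ks.count k)).sum = ks.length := by
  simp only [fun k => pv_count_irrel k ks]
  have hperm : (PySem.Set.ofList ks).Perm ks.dedup := by
    rw [List.perm_ext_iff_of_nodup (PySem.Set.nodup_ofList ks) (List.nodup_dedup ks)]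
    intro a; rw [PySem.Set.mem_ofList, List.mem_dedup]
  calc ((PySem.Set.ofList ks).map (fun k => @List.count α instBEqOfDecidableEq k ks)).sum
      = (ks.dedup.map (fun k => @List.count α instBEqOfDecidableEq k ks)).sum := (hperm.map _).sum_eq
    _ = ks.length := List.sum_map_count_dedup_eq_length ks

-- A's tally-then-sum over the counter equals length minus number of distinct elements
lemma pv_counter_loop_eq {α : Type} [BEq α] [LawfulBEq α] [DecidableEq α] (ks : List α) :
    ((PySem.Dict.counter ks).values.foldl
        (fun acc c => if c > 1 then acc + (c - 1) else acc) 0)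
      = (ks.length : Int) - ((PySem.Set.ofList ks).length : Int) := by
  have hvals : (PySem.Dict.counter ks).values
      = (PySem.Set.ofList ks).map (fun k => ((ks.count k : Nat) : Int)) := by
    simp [PySem.Dict.values, PySem.Dict.items_counter]
  rw [hvals]
  have hfun : (fun (acc c : Int) => if c > 1 then acc + (c - 1) else acc)
      = (fun acc c => acc + (if c > 1 then c - 1 else 0)) := by
    funext acc c; split_ifs <;> ring
  rw [hfun, List.foldl_map, PySem.List.foldl_add, zero_add]
  have hmap : (PySem.Set.ofList ks).map
        (fun k => if ((ks.count k : Nat) : Int) > 1 then ((ks.count k : Nat) : Int) - 1 else 0)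
      = (PySem.Set.ofList ks).map (fun k => ((ks.count k : Nat) : Int) - 1) := by
    apply List.map_congr_left
    intro k hk
    have hk' : k ∈ ks := by simpa [PySem.Set.mem_ofList] using hk
    have : 0 < ks.count k := List.count_pos_iff.2 hk'
    split_ifs with h
    · rfl
    · omega
  rw [hmap]
  have hsum := pv_sum_count_ofList ks
  have hlen : ((PySem.Set.ofList ks).map (fun k => ((ks.count k : Nat) : Int) - 1)).sum
      = (((PySem.Set.ofList ks).map (fun k => ks.count k)).sum : Int)
        - ((PySem.Set.ofList ks).length : Int) := by
    induction PySem.Set.ofList ks with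
    | nil => simp
    | cons x xs ih => simp [ih]; ring
  rw [hlen, hsum]

-- on a ≤-sorted list, #adjacent equal pairs = length - #distinct (Mathlib dedup)
lemma pv_adjdups_of_pairwise (s : List (List Int)) (hs : s.Pairwise (· ≤ ·)) :
    pvAdjDups s = (s.length : Int) - (s.dedup.length : Int) := by
  induction s with
  | nil => simp [pvAdjDups]
  | cons x t ih =>
    cases t with
    | nil => simp [pvAdjDups]
    | cons y rest =>
      have htail : (y :: rest).Pairwise (· ≤ ·) := hs.tail
      have hxy : x ≤ y := (List.pairwise_cons.1 hs).1 y (by simp)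
      have ihv := ih htail
      by_cases hxyeq : x = y
      · have hmem : x ∈ y :: rest := by simp [hxyeq]
        rw [List.dedup_cons_of_mem hmem]
        simp only [pvAdjDups, if_pos hxyeq, ihv, List.length_cons]
        push_cast; ring
      · have hmem : x ∉ y :: rest := by
          intro hx
          rcases List.mem_cons.1 hx with h | h
          · exact hxyeq h
          · have hyx : y ≤ x := (List.pairwise_cons.1 htail).1 x h
            exact hxyeq (le_antisymm hxy hyx)
        rw [List.dedup_cons_of_notMem hmem]
        simp only [pvAdjDups, if_neg hxyeq, ihv, List.length_cons]
        push_cast; ring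

-- scan of the sorted list = length - #distinct of the original list
lemma pv_adjdups_sorted (l : List (List Int)) :
    pvAdjDups (PySem.List.sorted l (fun x => x) false)
      = (l.length : Int) - ((PySem.Set.ofList l).length : Int) := by
  set s := PySem.List.sorted l (fun x => x) false with hsdef
  have hperm : s.Perm l := PySem.List.sorted_perm l _ _
  have hpair : s.Pairwise (· ≤ ·) := by
    have he : s = @PySem.List.sorted (List Int) (List Int) List.instLinearOrder.toLT
        LinearOrder.toDecidableLT l (fun x => x) false := by rw [hsdef]; congr 1
    rw [he]; exact PySem.List.sorted_pairwise (κ := List Int) l (fun x => x)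
  have hdedup : s.dedup.Perm (PySem.Set.ofList l) := by
    rw [List.perm_ext_iff_of_nodup (List.nodup_dedup s) (PySem.Set.nodup_ofList l)]
    intro a; rw [List.mem_dedup, PySem.Set.mem_ofList, hperm.mem_iff]
  rw [pv_adjdups_of_pairwise s hpair, hperm.length_eq, hdedup.length_eq]

-- ===== VERDICT (by name: the statement is the Claim_ definition above) =====
theorem count_double_profiles_spec : Claim_equal_count_double_profiles := by
  intro n m friendships _
  unfold Spec_count_double_profiles count_double_profiles count_double_profiles_alt
  set adj : PySem.Dict Int (List Int) :=
    friendships.foldl (fun d p => (d.modify p.1 [] (· ++ [p.2])).modify p.2 [] (· ++ [p.1]))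
      PySem.Dict.empty with hadj
  have hcounts : adj.values.foldl (fun c l => c.modify (pvCanon l) 0 (· + 1)) PySem.Dict.empty
      = PySem.Dict.counter (adj.values.map pvCanon) := by
    rw [PySem.Dict.counter_eq_foldl, List.foldl_map]
  simp only [hcounts, pv_counter_loop_eq, pv_adjdups_sorted, List.length_map]
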